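-- pv_equiv track=rewrite | github.com/infrablue1/my-algorithm | leet-code/algorithm/backtrack/path_with_obstacles.py | pathWithObstacles
-- ===== SOURCE A (Python) =====
-- def pathWithObstacles(obstacleGrid: list[list[int]]) -> list[list[int]]:
--     if len(obstacleGrid) == 0 or len(obstacleGrid[0]) == 0:
--         return []
--     m, n = len(obstacleGrid), len(obstacleGrid[0])
--     ans = []
--     vis = [[False for _ in range(n)] for _ in range(m)]
--
--     def dfs(x: int, y: int) -> bool:
--         if x >= m or y >= n or obstacleGrid[x][y] == 1 or vis[x][y]:
--             return False
--         ans.append([x, y])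
--         vis[x][y] = True
--         if x == m - 1 and y == n - 1:
--             return True
--         if dfs(x + 1, y) or dfs(x, y + 1):
--             return True
--         ans.pop()
--         return False
--
--     dfs(0, 0)
--     return ans
-- ===== SOURCE B (Python) =====
-- def pathWithObstacles(obstacleGrid: list[list[int]]) -> list[list[int]]:
--     # B: bottom-up reachability DP + greedy down-first walk (no backtracking).
--     if len(obstacleGrid) == 0 or len(obstacleGrid[0]) == 0:
--         return []
--     m, n = len(obstacleGrid), len(obstacleGrid[0])
--     # reach rows, built from the bottom row upwards; the virtual row below the
--     # grid is reachable only in the goal column, which encodes the goal cell.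
--     below = [False] * (n - 1) + [True]
--     rows = []
--     for row in reversed(obstacleGrid):
--         cur = [False] * n
--         right = False
--         for y in range(n - 1, -1, -1):
--             right = row[y] != 1 and (below[y] or right)
--             cur[y] = right
--         rows.append(cur)
--         below = cur
--     reach = rows[::-1]
--     if not reach[0][0]:
--         return []
--     path, x, y = [], 0, 0
--     while True:
--         path.append([x, y])
--         if x == m - 1 and y == n - 1:
--             return path
--         if x + 1 < m and reach[x + 1][y]:
--             x += 1
--         else:
--             y += 1
-- ===== Notes on version B (the rewrite author's own statement) =====
-- stated objective: alternative
-- what changed: Replaces the backtracking DFS with mutable visited/path state by a bottom-up boolean reachability DP over the rows followed by a greedy down-first walk that never backtracks; same O(mn) cost, no recursion and no path popping.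
-- outside the precondition, e.g. on pathWithObstacles([[1, 0], [0]]): A returns [], B raises IndexError
import Mathlib
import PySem

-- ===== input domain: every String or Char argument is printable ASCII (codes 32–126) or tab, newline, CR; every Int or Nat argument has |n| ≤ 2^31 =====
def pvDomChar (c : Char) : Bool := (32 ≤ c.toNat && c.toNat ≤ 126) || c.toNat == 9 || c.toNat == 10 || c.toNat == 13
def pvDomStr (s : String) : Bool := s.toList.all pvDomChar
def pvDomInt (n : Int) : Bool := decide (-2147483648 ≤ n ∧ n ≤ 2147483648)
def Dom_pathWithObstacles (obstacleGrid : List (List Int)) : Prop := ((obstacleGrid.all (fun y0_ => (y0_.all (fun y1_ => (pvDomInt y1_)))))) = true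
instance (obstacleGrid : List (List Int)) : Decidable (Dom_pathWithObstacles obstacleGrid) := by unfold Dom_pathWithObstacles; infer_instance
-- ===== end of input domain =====

-- B replaces A's backtracking DFS by a reachability DP plus a greedy walk; same O(mn) cost (objective: alternative).

-- ===== PORT A =====
-- vis[x][y] = True  (list-of-lists update)
def pvSet2 (vis : List (List Bool)) (x y : Nat) : List (List Bool) :=
  vis.set x ((vis.getD x []).set y true)

-- the nested `dfs`: returns (result, ans, vis).  The fuel argument only makes the
-- recursion structural; from the top-level call it never runs out (depth ≤ m+n+1).
def pvDfsA (grid : List (List Int)) (m n : Nat) :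
    Nat → Nat → Nat → List (List Int) → List (List Bool) → Bool × List (List Int) × List (List Bool)
  | 0, _, _, ans, vis => (false, ans, vis)
  | fuel+1, x, y, ans, vis =>
    if m ≤ x ∨ n ≤ y ∨ (grid.getD x []).getD y 0 = 1 ∨ (vis.getD x []).getD y false then
      (false, ans, vis)
    else
      let ans1 := ans ++ [[(x : Int), (y : Int)]]
      let vis1 := pvSet2 vis x y
      if x = m - 1 ∧ y = n - 1 then (true, ans1, vis1)
      else
        match pvDfsA grid m n fuel (x+1) y ans1 vis1 with
        | (true, a2, v2) => (true, a2, v2)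
        | (false, a2, v2) =>
          match pvDfsA grid m n fuel x (y+1) a2 v2 with
          | (true, a3, v3) => (true, a3, v3)
          | (false, a3, v3) => (false, a3.dropLast, v3)

def pathWithObstacles (obstacleGrid : List (List Int)) : List (List Int) :=
  if obstacleGrid.length = 0 ∨ (obstacleGrid.headD []).length = 0 then []
  else
    let m := obstacleGrid.length
    let n := (obstacleGrid.headD []).length
    (pvDfsA obstacleGrid m n (m+n+1) 0 0 [] (List.replicate m (List.replicate n false))).2.1

-- ===== PORT B =====
-- inner loop `for y in range(n-1,-1,-1)`: right-to-left over the row zipped with the row below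
def pvRowStep : List (Int × Bool) → List Bool
  | [] => []
  | (c, b) :: rest =>
    let r := pvRowStep rest
    ((c != 1) && (b || r.headD false)) :: r

-- `for row in reversed(obstacleGrid)` building the reach rows bottom-up
def pvReachRows (n : Nat) : List (List Int) → List (List Bool)
  | [] => []
  | r :: rest =>
    let below := pvReachRows n rest
    pvRowStep (r.zip (below.headD (List.replicate (n-1) false ++ [true]))) :: below

-- the `while True` greedy walk (fuel = m+n bounds the path length, never exhausted)
def pvWalk (reach : List (List Bool)) (m n : Nat) :
    Nat → Nat → Nat → List (List Int) → List (List Int)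
  | 0, _, _, acc => acc
  | fuel+1, x, y, acc =>
    let acc1 := acc ++ [[(x : Int), (y : Int)]]
    if x = m - 1 ∧ y = n - 1 then acc1
    else if x + 1 < m ∧ (reach.getD (x+1) []).getD y false then pvWalk reach m n fuel (x+1) y acc1
    else pvWalk reach m n fuel x (y+1) acc1

def pathWithObstacles_alt (obstacleGrid : List (List Int)) : List (List Int) :=
  if obstacleGrid.length = 0 ∨ (obstacleGrid.headD []).length = 0 then []
  else
    let m := obstacleGrid.length
    let n := (obstacleGrid.headD []).length
    let reach := pvReachRows n obstacleGrid
    if ((reach.headD []).headD false) = false then []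
    else pvWalk reach m n (m+n) 0 0 []

-- ===== PRECONDITION & SPEC =====
-- Pre_ excludes ragged grids in which some row is shorter than the first row: there A
-- raises IndexError whenever the DFS touches a missing cell, and B reads the grid as
-- rectangular (it raises on the excluded example too).
def Pre_pathWithObstacles (obstacleGrid : List (List Int)) : Prop :=
  ∀ r ∈ obstacleGrid, (obstacleGrid.headD []).length ≤ r.length

instance (obstacleGrid : List (List Int)) : Decidable (Pre_pathWithObstacles obstacleGrid) := by
  unfold Pre_pathWithObstacles; infer_instance

def pvWitness_pathWithObstacles : List (List Int) := [[0, 0], [1, 0]]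

def Spec_pathWithObstacles (obstacleGrid : List (List Int)) (out : List (List Int)) : Prop :=
  out = pathWithObstacles_alt obstacleGrid
instance (obstacleGrid : List (List Int)) (out : List (List Int)) : Decidable (Spec_pathWithObstacles obstacleGrid out) := by
  unfold Spec_pathWithObstacles; infer_instance

-- ===== CLAIM (what is proved, stated in full; the proofs are below) =====
def Claim_equal_pathWithObstacles : Prop :=
  ∀ (obstacleGrid : List (List Int)), Dom_pathWithObstacles obstacleGrid →
    Pre_pathWithObstacles obstacleGrid →
    Spec_pathWithObstacles obstacleGrid (pathWithObstacles obstacleGrid)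

-- ===== LEMMAS AND PROOFS =====

-- reachability spec: a right/down path of free cells from (x,y) to (m-1,n-1)
def pvRb (grid : List (List Int)) (m n : Nat) (x y : Nat) : Bool :=
  if h : x < m ∧ y < n then
    ((grid.getD x []).getD y 0 != 1) &&
    ((decide (x = m - 1) && decide (y = n - 1)) || pvRb grid m n (x+1) y || pvRb grid m n x (y+1))
  else false
termination_by (m - x) + (n - y)
decreasing_by all_goals omega

theorem pvRb_bounds (grid : List (List Int)) (m n x y : Nat) (h : pvRb grid m n x y = true) :
    x < m ∧ y < n := by
  rw [pvRb] at h
  by_cases hb : x < m ∧ y < n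
  · exact hb
  · simp [hb] at h

theorem pvRb_out (grid : List (List Int)) (m n x y : Nat) (h : ¬ (x < m ∧ y < n)) :
    pvRb grid m n x y = false := by
  rw [pvRb]; simp [h]

theorem pvRb_unfold_in (grid : List (List Int)) (m n x y : Nat) (hx : x < m) (hy : y < n) :
    pvRb grid m n x y = (((grid.getD x []).getD y 0 != 1) &&
      ((decide (x = m - 1) && decide (y = n - 1)) ||
        pvRb grid m n (x+1) y || pvRb grid m n x (y+1))) := by
  rw [pvRb]; simp [hx, hy]

theorem pvHeadD_getD {α : Type} (l : List α) (d : α) : l.headD d = l.getD 0 d := by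
  cases l <;> simp

-- one row of the DP: pvRowStep on a column suffix computes pvRb on that row
theorem pvRowStep_suffix (grid : List (List Int)) (m n x : Nat)
    (hx : x < m) (hrow : n ≤ (grid.getD x []).length)
    (bel : List Bool) (hlen : bel.length = n)
    (hbel : ∀ j, j < n → bel.getD j false =
      (if x = m - 1 then decide (j = n - 1) else pvRb grid m n (x+1) j)) :
    ∀ y0, pvRowStep (((grid.getD x []).drop y0).zip (bel.drop y0)) =
      (List.range (n - y0)).map (fun j => pvRb grid m n x (y0 + j)) := by
  suffices H : ∀ (k y0 : Nat), n - y0 ≤ k →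
      pvRowStep (((grid.getD x []).drop y0).zip (bel.drop y0)) =
        (List.range (n - y0)).map (fun j => pvRb grid m n x (y0 + j)) from
    fun y0 => H n y0 (by omega)
  intro k
  induction k with
  | zero =>
    intro y0 h0
    have hb : bel.drop y0 = [] := List.drop_eq_nil_of_le (by omega)
    have hr : n - y0 = 0 := by omega
    rw [hb]
    simp only [List.zip_nil_right, hr, List.range_zero, List.map_nil]
    rw [pvRowStep]
  | succ d ihd =>
    intro y0 hk
    by_cases hy : y0 < n
    · have h1 : y0 < (grid.getD x []).length := by omega
      have h2 : y0 < bel.length := by omega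
      rw [List.drop_eq_getElem_cons h1, List.drop_eq_getElem_cons h2, List.zip_cons_cons]
      simp only [pvRowStep]
      rw [ihd (y0+1) (by omega)]
      have hrange : n - y0 = (n - (y0+1)) + 1 := by omega
      rw [hrange, List.range_succ_eq_map, List.map_cons, List.map_map]
      have htail : (List.range (n - (y0+1))).map (fun j => pvRb grid m n x (y0 + 1 + j)) =
          (List.range (n - (y0+1))).map ((fun j => pvRb grid m n x (y0 + j)) ∘ (· + 1)) := by
        apply List.map_congr_left
        intro j _
        simp only [Function.comp]
        congr 1
        omega
      rw [← htail]
      congr 1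
      -- head element
      have hhead : (List.headD ((List.range (n - (y0+1))).map
          (fun j => pvRb grid m n x (y0 + 1 + j))) false) = pvRb grid m n x (y0+1) := by
        by_cases hy1 : y0 + 1 < n
        · have : n - (y0+1) = (n - (y0+2)) + 1 := by omega
          rw [this, List.range_succ_eq_map]
          simp
        · have h0 : n - (y0+1) = 0 := by omega
          rw [h0]
          simp [pvRb_out grid m n x (y0+1) (by omega)]
      rw [hhead]
      have hgb := hbel y0 hy
      simp only [List.getD_eq_getElem?_getD, List.getElem?_eq_getElem h2, Option.getD_some] at hgb
      have hu := pvRb_unfold_in grid m n x y0 hx hy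
      simp only [List.getD_eq_getElem?_getD (l := grid.getD x []), List.getElem?_eq_getElem h1,
        Option.getD_some] at hu
      show ((grid.getD x [])[y0] != 1 && (bel[y0] || pvRb grid m n x (y0+1))) = pvRb grid m n x y0
      rw [hu, hgb]
      by_cases hlast : x = m - 1
      · subst hlast
        have hout : pvRb grid m n (m - 1 + 1) y0 = false := by
          apply pvRb_out
          omega
        simp [hout]
      · simp [hlast]
    · have hb : bel.drop y0 = [] := List.drop_eq_nil_of_le (by omega)
      have hr : n - y0 = 0 := by omega
      rw [hb]
      simp only [List.zip_nil_right, hr, List.range_zero, List.map_nil]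
      rw [pvRowStep]

-- the whole DP: pvReachRows on a row suffix computes pvRb
theorem pvReachRows_drop (grid : List (List Int)) (n : Nat) (hn : 0 < n)
    (hpre : ∀ r ∈ grid, n ≤ r.length) :
    ∀ k, pvReachRows n (grid.drop k) =
      (List.range (grid.length - k)).map
        (fun i => (List.range n).map (fun y => pvRb grid grid.length n (k+i) y)) := by
  suffices H : ∀ (c k : Nat), grid.length - k ≤ c → pvReachRows n (grid.drop k) =
      (List.range (grid.length - k)).map
        (fun i => (List.range n).map (fun y => pvRb grid grid.length n (k+i) y)) from
    fun k => H grid.length k (by omega)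
  intro c
  induction c with
  | zero =>
    intro k hk
    have hd : grid.drop k = [] := List.drop_eq_nil_of_le (by omega)
    have h0 : grid.length - k = 0 := by omega
    rw [hd, h0]
    simp [pvReachRows]
  | succ d ih =>
    intro k hk
    by_cases hkm : k < grid.length
    · rw [List.drop_eq_getElem_cons hkm]
      rw [pvReachRows]
      rw [ih (k+1) (by omega)]
      have hgk : grid.getD k [] = grid[k] := by
        rw [List.getD_eq_getElem?_getD, List.getElem?_eq_getElem hkm]
        rfl
      have hrowlen : n ≤ (grid.getD k []).length := by
        rw [hgk]; exact hpre _ (List.getElem_mem hkm)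
      -- the RHS, peeled once
      have hLk : grid.length - k = (grid.length - (k+1)) + 1 := by omega
      rw [hLk, List.range_succ_eq_map, List.map_cons, List.map_map]
      have htail : (List.range (grid.length - (k+1))).map
            (fun i => (List.range n).map (fun y => pvRb grid grid.length n (k+1+i) y)) =
          (List.range (grid.length - (k+1))).map
            ((fun i => (List.range n).map (fun y => pvRb grid grid.length n (k+i) y)) ∘ (· + 1)) := by
        apply List.map_congr_left
        intro i _
        simp only [Function.comp]
        have : k + 1 + i = k + (i + 1) := by omega
        rw [this]
      rw [← htail]
      congr 1
      -- the head row
      by_cases hk1 : k + 1 < grid.length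
      · have hL1 : grid.length - (k+1) = (grid.length - (k+2)) + 1 := by omega
        rw [hL1, List.range_succ_eq_map, List.map_cons, List.headD_cons]
        have hbel : ∀ j, j < n → ((List.range n).map
              (fun y => pvRb grid grid.length n (k+1+0) y)).getD j false =
            (if k = grid.length - 1 then decide (j = n - 1)
             else pvRb grid grid.length n (k+1) j) := by
          intro j hj
          rw [if_neg (by omega)]
          rw [List.getD_eq_getElem?_getD, List.getElem?_map, List.getElem?_range (by simpa using hj)]
          rfl
        have := pvRowStep_suffix grid grid.length n k hkm hrowlen
          ((List.range n).map (fun y => pvRb grid grid.length n (k+1+0) y))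
          (by simp) hbel 0
        simp only [List.drop_zero, Nat.sub_zero, Nat.zero_add] at this
        rw [hgk] at this
        rw [this]
        simp
      · have hL0 : grid.length - (k+1) = 0 := by omega
        rw [hL0, List.range_zero, List.map_nil, List.headD_nil]
        have hbel : ∀ j, j < n → (List.replicate (n-1) false ++ [true]).getD j false =
            (if k = grid.length - 1 then decide (j = n - 1)
             else pvRb grid grid.length n (k+1) j) := by
          intro j hj
          rw [if_pos (by omega)]
          rw [List.getD_eq_getElem?_getD]
          by_cases hjn : j < n - 1
          · rw [List.getElem?_append_left (by simpa using hjn), List.getElem?_replicate]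
            simp [hjn, show ¬ (j = n - 1) by omega]
          · have hje : j = n - 1 := by omega
            subst hje
            rw [List.getElem?_append_right (by simp)]
            simp
        have := pvRowStep_suffix grid grid.length n k hkm hrowlen
          (List.replicate (n-1) false ++ [true]) (by simp; omega) hbel 0
        simp only [List.drop_zero, Nat.sub_zero, Nat.zero_add] at this
        rw [hgk] at this
        rw [this]
        simp
    · have hd : grid.drop k = [] := List.drop_eq_nil_of_le (by omega)
      have h0 : grid.length - k = 0 := by omega
      rw [hd, h0]
      simp [pvReachRows]

theorem pvReach_getD (grid : List (List Int)) (n : Nat) (hn : 0 < n)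
    (hpre : ∀ r ∈ grid, n ≤ r.length) (a b : Nat) :
    ((pvReachRows n grid).getD a []).getD b false = pvRb grid grid.length n a b := by
  have h := pvReachRows_drop grid n hn hpre 0
  simp only [List.drop_zero, Nat.sub_zero, Nat.zero_add] at h
  rw [h]
  set F := fun i => List.map (fun y => pvRb grid grid.length n i y) (List.range n) with hF
  by_cases ha : a < grid.length
  · have hrow : ((List.range grid.length).map F).getD a [] = F a := by
      rw [List.getD_eq_getElem?_getD, List.getElem?_map, List.getElem?_range ha]
      rfl
    rw [hrow, hF]
    simp only []
    rw [List.getD_eq_getElem?_getD, List.getElem?_map]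
    by_cases hb : b < n
    · rw [List.getElem?_range hb]
      simp
    · rw [List.getElem?_eq_none (by simpa using hb)]
      rw [pvRb_out grid grid.length n a b (by omega)]
      simp
  · have hrow : ((List.range grid.length).map F).getD a [] = [] := by
      rw [List.getD_eq_getElem?_getD, List.getElem?_eq_none (by simpa using ha)]
      rfl
    rw [hrow]
    rw [pvRb_out grid grid.length n a b (by omega)]
    simp

def pvVshape (vis : List (List Bool)) (m n : Nat) : Prop :=
  vis.length = m ∧ ∀ r ∈ vis, r.length = n

def pvInv (grid : List (List Int)) (m n : Nat) (vis : List (List Bool)) (x y : Nat) : Prop :=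
  ∀ a b, x ≤ a → y ≤ b → ((vis.getD a []).getD b false) = true → pvRb grid m n a b = false

theorem pvSet2_shape (vis : List (List Bool)) (m n x y : Nat)
    (h : pvVshape vis m n) (hx : x < m) : pvVshape (pvSet2 vis x y) m n := by
  obtain ⟨h1, h2⟩ := h
  constructor
  · simp [pvSet2, h1]
  · intro r hr
    rcases List.mem_or_eq_of_mem_set hr with hr | rfl
    · exact h2 r hr
    · have hxl : x < vis.length := by omega
      have hmem : vis.getD x [] ∈ vis := by
        rw [List.getD_eq_getElem?_getD, List.getElem?_eq_getElem hxl]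
        exact List.getElem_mem hxl
      have := h2 _ hmem
      rw [List.getD_eq_getElem?_getD, List.getElem?_eq_getElem hxl] at this
      simp only [List.length_set, List.getD_eq_getElem?_getD, List.getElem?_eq_getElem hxl]
      simpa using this

theorem pvSet2_getD (vis : List (List Bool)) (m n x y : Nat)
    (h : pvVshape vis m n) (hx : x < m) (hy : y < n) (a b : Nat) :
    (((pvSet2 vis x y).getD a []).getD b false) =
      if a = x ∧ b = y then true else ((vis.getD a []).getD b false) := by
  obtain ⟨h1, h2⟩ := h
  have hxl : x < vis.length := by omega
  have hrow : (vis.getD x []).length = n := by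
    have hmem : vis.getD x [] ∈ vis := by
      rw [List.getD_eq_getElem?_getD, List.getElem?_eq_getElem hxl]
      exact List.getElem_mem hxl
    exact h2 _ hmem
  simp only [pvSet2, List.getD_eq_getElem?_getD, List.getElem?_set, hxl, if_pos, if_true]
  by_cases hax : x = a
  · subst hax
    simp only [if_pos rfl, if_pos hxl, Option.getD_some]
    rw [List.getD_eq_getElem?_getD] at hrow
    by_cases hby : y = b
    · subst hby
      have hbl : y < (vis[x]?.getD []).length := by omega
      simp [List.getElem?_set, hbl]
    · have hc : ¬ (x = x ∧ b = y) := fun h => hby h.2.symm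
      simp [List.getElem?_set, hby, hc, List.getD_eq_getElem?_getD]
      exact fun h => absurd h.symm hby
  · simp only [if_neg hax]
    have : ¬ (a = x ∧ b = y) := fun h => hax h.1.symm
    simp [this]

-- the DFS invariant lemma: on reachable cells the DFS succeeds and its path is the
-- greedy walk; on unreachable cells it restores ans and only marks unreachable cells
theorem pvDfs_main (grid : List (List Int)) (m n : Nat) (reach : List (List Bool))
    (hreach : ∀ a b, ((reach.getD a []).getD b false) = pvRb grid m n a b) :
    ∀ (f x y : Nat) (ans : List (List Int)) (vis : List (List Bool)),
      (m-x)+(n-y)+1 ≤ f → pvVshape vis m n → pvInv grid m n vis x y →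
      ((pvRb grid m n x y = true →
         ∃ vis', pvDfsA grid m n f x y ans vis = (true, pvWalk reach m n f x y ans, vis')) ∧
       (pvRb grid m n x y = false →
         ∃ vis', pvDfsA grid m n f x y ans vis = (false, ans, vis') ∧ pvVshape vis' m n ∧
           ∀ a b, ((vis'.getD a []).getD b false) = true →
             ((vis.getD a []).getD b false) = true ∨
               (x ≤ a ∧ y ≤ b ∧ pvRb grid m n a b = false))) := by
  intro f
  induction f with
  | zero => intro x y ans vis hf hsh hI; omega
  | succ f ih =>
    intro x y ans vis hf hsh hI
    by_cases hguard : m ≤ x ∨ n ≤ y ∨ (grid.getD x []).getD y 0 = 1 ∨ (vis.getD x []).getD y false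
    · have hRf : pvRb grid m n x y = false := by
        rcases hguard with h | h | h | h
        · exact pvRb_out grid m n x y (by omega)
        · exact pvRb_out grid m n x y (by omega)
        · by_cases hb : x < m ∧ y < n
          · rw [pvRb_unfold_in grid m n x y hb.1 hb.2]
            have hb1 : ((grid.getD x []).getD y 0 != 1) = false := by
              rw [h]
              simp
            rw [hb1, Bool.false_and]
          · exact pvRb_out grid m n x y hb
        · exact hI x y le_rfl le_rfl h
      constructor
      · intro hRt
        rw [hRt] at hRf
        cases hRf
      · intro _
        refine ⟨vis, ?_, hsh, fun a b hm => Or.inl hm⟩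
        simp only [pvDfsA]
        rw [if_pos hguard]
    · have hgneg := hguard
      push_neg at hguard
      obtain ⟨hxm, hyn, hfree, hnv⟩ := hguard
      have hx : x < m := by omega
      have hy : y < n := by omega
      have hfree' : ((grid.getD x []).getD y 0 != 1) = true := bne_iff_ne.mpr hfree
      by_cases hgoal : x = m - 1 ∧ y = n - 1
      · have hRt : pvRb grid m n x y = true := by
          rw [pvRb_unfold_in grid m n x y hx hy, hfree']
          simp [hgoal.1, hgoal.2]
        constructor
        · intro _
          refine ⟨pvSet2 vis x y, ?_⟩
          simp only [pvDfsA, pvWalk]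
          rw [if_neg hgneg, if_pos hgoal, if_pos hgoal]
        · intro hRf
          rw [hRt] at hRf
          cases hRf
      · have hng : (decide (x = m - 1) && decide (y = n - 1)) = false := by
          rcases Decidable.em (x = m - 1) with h1 | h1
          · rcases Decidable.em (y = n - 1) with h2 | h2
            · exact absurd ⟨h1, h2⟩ hgoal
            · simp [h2]
          · simp [h1]
        have hsh1 : pvVshape (pvSet2 vis x y) m n := pvSet2_shape vis m n x y hsh hx
        have hget1 := pvSet2_getD vis m n x y hsh hx hy
        have hI1 : pvInv grid m n (pvSet2 vis x y) (x+1) y := by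
          intro a b ha hb hm
          rw [hget1 a b] at hm
          by_cases hab : a = x ∧ b = y
          · omega
          · rw [if_neg hab] at hm
            exact hI a b (by omega) hb hm
        by_cases hd : pvRb grid m n (x+1) y = true
        · obtain ⟨vis2, hdown⟩ :=
            (ih (x+1) y (ans ++ [[(x : Int), (y : Int)]]) (pvSet2 vis x y)
              (by omega) hsh1 hI1).1 hd
          have hRt : pvRb grid m n x y = true := by
            rw [pvRb_unfold_in grid m n x y hx hy, hfree', hd]
            simp
          constructor
          · intro _
            refine ⟨vis2, ?_⟩
            simp only [pvDfsA, pvWalk]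
            rw [if_neg hgneg, if_neg hgoal, if_neg hgoal]
            rw [hdown]
            have hx1 : x + 1 < m := (pvRb_bounds grid m n (x+1) y hd).1
            rw [if_pos ⟨hx1, by rw [hreach]; exact hd⟩]
          · intro hRf
            rw [hRt] at hRf
            cases hRf
        · have hdf : pvRb grid m n (x+1) y = false := by
            cases hdd : pvRb grid m n (x+1) y
            · rfl
            · exact absurd hdd hd
          obtain ⟨vis2, hdown, hsh2, hext2⟩ :=
            (ih (x+1) y (ans ++ [[(x : Int), (y : Int)]]) (pvSet2 vis x y)
              (by omega) hsh1 hI1).2 hdf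
          have hI2 : pvInv grid m n vis2 x (y+1) := by
            intro a b ha hb hm
            rcases hext2 a b hm with hm1 | ⟨_, _, hRfab⟩
            · rw [hget1 a b] at hm1
              by_cases hab : a = x ∧ b = y
              · omega
              · rw [if_neg hab] at hm1
                exact hI a b ha (by omega) hm1
            · exact hRfab
          have hcond : ¬ (x + 1 < m ∧ ((reach.getD (x+1) []).getD y false : Bool)) := by
            rintro ⟨-, hc⟩
            rw [hreach] at hc
            rw [hdf] at hc
            cases hc
          by_cases hr : pvRb grid m n x (y+1) = true
          · obtain ⟨vis3, hright⟩ :=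
              (ih x (y+1) (ans ++ [[(x : Int), (y : Int)]]) vis2 (by omega) hsh2 hI2).1 hr
            have hRt : pvRb grid m n x y = true := by
              rw [pvRb_unfold_in grid m n x y hx hy, hfree', hr]
              simp
            constructor
            · intro _
              refine ⟨vis3, ?_⟩
              simp only [pvDfsA, pvWalk]
              rw [if_neg hgneg, if_neg hgoal, if_neg hgoal]
              rw [hdown]
              simp only []
              rw [hright, if_neg hcond]
            · intro hRf
              rw [hRt] at hRf
              cases hRf
          · have hrf : pvRb grid m n x (y+1) = false := by
              cases hrr : pvRb grid m n x (y+1)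
              · rfl
              · exact absurd hrr hr
            obtain ⟨vis3, hright, hsh3, hext3⟩ :=
              (ih x (y+1) (ans ++ [[(x : Int), (y : Int)]]) vis2 (by omega) hsh2 hI2).2 hrf
            have hRf : pvRb grid m n x y = false := by
              rw [pvRb_unfold_in grid m n x y hx hy, hng, hdf, hrf]
              simp
            constructor
            · intro hRt
              rw [hRt] at hRf
              cases hRf
            · intro _
              refine ⟨vis3, ?_, hsh3, ?_⟩
              · simp only [pvDfsA]
                rw [if_neg hgneg, if_neg hgoal]
                rw [hdown]
                simp only []
                rw [hright]
                simp
              · intro a b hm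
                rcases hext3 a b hm with hm2 | ⟨ha, hb, hRfab⟩
                · rcases hext2 a b hm2 with hm1 | ⟨ha, hb, hRfab⟩
                  · rw [hget1 a b] at hm1
                    by_cases hab : a = x ∧ b = y
                    · exact Or.inr ⟨by omega, by omega, by rw [hab.1, hab.2]; exact hRf⟩
                    · rw [if_neg hab] at hm1
                      exact Or.inl hm1
                  · exact Or.inr ⟨by omega, hb, hRfab⟩
                · exact Or.inr ⟨ha, by omega, hRfab⟩

theorem pvWalk_fuel (grid : List (List Int)) (m n : Nat) (reach : List (List Bool))
    (hreach : ∀ a b, ((reach.getD a []).getD b false) = pvRb grid m n a b) :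
    ∀ (f g x y : Nat) (acc : List (List Int)), pvRb grid m n x y = true →
      (m-x)+(n-y) ≤ f → (m-x)+(n-y) ≤ g →
      pvWalk reach m n f x y acc = pvWalk reach m n g x y acc := by
  intro f
  induction f with
  | zero =>
    intro g x y acc hR hf hg
    obtain ⟨hxm, hyn⟩ := pvRb_bounds grid m n x y hR
    omega
  | succ f ih =>
    intro g x y acc hR hf hg
    obtain ⟨hxm, hyn⟩ := pvRb_bounds grid m n x y hR
    match g, hg with
    | 0, hg => omega
    | g+1, hg =>
      simp only [pvWalk]
      by_cases hgoal : x = m - 1 ∧ y = n - 1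
      · simp [hgoal]
      · rw [if_neg hgoal, if_neg hgoal]
        have hRu := pvRb_unfold_in grid m n x y hxm hyn
        rw [hR] at hRu
        have hng : (decide (x = m - 1) && decide (y = n - 1)) = false := by
          rcases Decidable.em (x = m - 1) with h1 | h1
          · rcases Decidable.em (y = n - 1) with h2 | h2
            · exact absurd ⟨h1, h2⟩ hgoal
            · simp [h2]
          · simp [h1]
        by_cases hd : pvRb grid m n (x+1) y = true
        · obtain ⟨hx1, _⟩ := pvRb_bounds grid m n (x+1) y hd
          rw [if_pos ⟨hx1, by rw [hreach]; exact hd⟩, if_pos ⟨hx1, by rw [hreach]; exact hd⟩]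
          exact ih g (x+1) y _ hd (by omega) (by omega)
        · have hcond : ¬ (x + 1 < m ∧ ((reach.getD (x+1) []).getD y false : Bool)) := by
            rintro ⟨-, hc⟩
            rw [hreach] at hc
            exact hd hc
          rw [if_neg hcond, if_neg hcond]
          have hr : pvRb grid m n x (y+1) = true := by
            have hdd : pvRb grid m n (x+1) y = false := by
              cases hdx : pvRb grid m n (x+1) y
              · rfl
              · exact absurd hdx hd
            rw [hng, hdd] at hRu
            cases hrr : pvRb grid m n x (y+1)
            · rw [hrr] at hRu; simp at hRu
            · rfl
          exact ih g x (y+1) _ hr (by omega) (by omega)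

theorem pathWithObstacles_spec : Claim_equal_pathWithObstacles := by
  intro g _ hpre
  unfold Spec_pathWithObstacles pathWithObstacles pathWithObstacles_alt
  by_cases h0 : g.length = 0 ∨ (g.headD []).length = 0
  · rw [if_pos h0, if_pos h0]
  · rw [if_neg h0, if_neg h0]
    push_neg at h0
    have hm : 0 < g.length := by omega
    have hn : 0 < (g.headD []).length := by omega
    have hreach := pvReach_getD g (g.headD []).length hn hpre
    have hsh0 : pvVshape
        (List.replicate g.length (List.replicate (g.headD []).length false))
        g.length (g.headD []).length := by
      constructor
      · simp
      · intro r hr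
        rw [List.eq_of_mem_replicate hr]
        simp
    have hI0 : pvInv g g.length (g.headD []).length
        (List.replicate g.length (List.replicate (g.headD []).length false)) 0 0 := by
      intro a b _ _ hmk
      exfalso
      rw [List.getD_eq_getElem?_getD
            (l := List.replicate g.length (List.replicate (g.headD []).length false)),
          List.getElem?_replicate] at hmk
      by_cases ha : a < g.length
      · rw [if_pos ha, Option.getD_some, List.getD_eq_getElem?_getD,
            List.getElem?_replicate] at hmk
        by_cases hb : b < (g.headD []).length
        · rw [if_pos hb] at hmk
          cases hmk
        · rw [if_neg hb] at hmk
          cases hmk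
      · rw [if_neg ha] at hmk
        cases hmk
    show (pvDfsA g g.length (g.headD []).length (g.length + (g.headD []).length + 1) 0 0 []
        (List.replicate g.length (List.replicate (g.headD []).length false))).2.1 =
      (if ((pvReachRows (g.headD []).length g).headD []).headD false = false then []
       else pvWalk (pvReachRows (g.headD []).length g) g.length (g.headD []).length
         (g.length + (g.headD []).length) 0 0 [])
    cases hR : pvRb g g.length (g.headD []).length 0 0 with
    | false =>
      obtain ⟨vis', hdfs, -, -⟩ :=
        (pvDfs_main g g.length (g.headD []).length (pvReachRows (g.headD []).length g) hreach
          (g.length + (g.headD []).length + 1) 0 0 []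
          (List.replicate g.length (List.replicate (g.headD []).length false))
          (by omega) hsh0 hI0).2 hR
      have hb0 : ((pvReachRows (g.headD []).length g).headD []).headD false = false := by
        rw [pvHeadD_getD, pvHeadD_getD, hreach 0 0, hR]
      rw [hdfs, if_pos hb0]
    | true =>
      obtain ⟨vis', hdfs⟩ :=
        (pvDfs_main g g.length (g.headD []).length (pvReachRows (g.headD []).length g) hreach
          (g.length + (g.headD []).length + 1) 0 0 []
          (List.replicate g.length (List.replicate (g.headD []).length false))
          (by omega) hsh0 hI0).1 hR
      have hb1 : ((pvReachRows (g.headD []).length g).headD []).headD false = true := by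
        rw [pvHeadD_getD, pvHeadD_getD, hreach 0 0, hR]
      rw [hdfs, if_neg (by rw [hb1]; simp)]
      exact pvWalk_fuel g g.length (g.headD []).length (pvReachRows (g.headD []).length g) hreach
        (g.length + (g.headD []).length + 1) (g.length + (g.headD []).length) 0 0 [] hR
        (by omega) (by omega)
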